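-- pv_equiv track=rewrite | github.com/HarrrrryLi/LeetCode | 712. Minimum ASCII Delete Sum for Two Strings/Python 3/solution.py | maxCommonSubsequenceDP
-- ===== SOURCE A (Python) =====
-- def maxCommonSubsequenceDP(s1: str, s2: str) -> int:
--     size1, size2 = len(s1), len(s2)
--
--     if size1 == 0 or size2 == 0:
--         return 0
--     dp = [[0] * (size2 + 1) for _ in range(size1 + 1)]
--     for cnt1 in range(1, size1 + 1):
--         for cnt2 in range(1, size2 + 1):
--             if s1[cnt1 - 1] == s2[cnt2 - 1]:
--                 dp[cnt1][cnt2] = dp[cnt1 - 1][cnt2 - 1] + \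
--                     ord(s1[cnt1 - 1]) * 2
--             else:
--                 dp[cnt1][cnt2] = max(
--                     dp[cnt1][cnt2 - 1], dp[cnt1 - 1][cnt2])
--     return dp[-1][-1]
-- ===== SOURCE B (Python) =====
-- def maxCommonSubsequenceDP(s1: str, s2: str) -> int:
--     n, m = len(s1), len(s2)
--     memo = [[None] * (m + 1) for _ in range(n + 1)]
--
--     def f(i, j):
--         if i == 0 or j == 0:
--             return 0
--         v = memo[i][j]
--         if v is None:
--             if s1[i - 1] == s2[j - 1]:
--                 v = f(i - 1, j - 1) + ord(s1[i - 1]) * 2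
--             else:
--                 v = max(f(i, j - 1), f(i - 1, j))
--             memo[i][j] = v
--         return v
--
--     return f(n, m)
-- ===== Notes on version B (the rewrite author's own statement) =====
-- stated objective: alternative
-- what changed: Replaced the bottom-up 2D dynamic-programming table filled by nested index loops with a top-down memoized recursion f(i,j) over prefix lengths; the table of A disappears in favour of on-demand recursive evaluation with a memo.
import Mathlib
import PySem

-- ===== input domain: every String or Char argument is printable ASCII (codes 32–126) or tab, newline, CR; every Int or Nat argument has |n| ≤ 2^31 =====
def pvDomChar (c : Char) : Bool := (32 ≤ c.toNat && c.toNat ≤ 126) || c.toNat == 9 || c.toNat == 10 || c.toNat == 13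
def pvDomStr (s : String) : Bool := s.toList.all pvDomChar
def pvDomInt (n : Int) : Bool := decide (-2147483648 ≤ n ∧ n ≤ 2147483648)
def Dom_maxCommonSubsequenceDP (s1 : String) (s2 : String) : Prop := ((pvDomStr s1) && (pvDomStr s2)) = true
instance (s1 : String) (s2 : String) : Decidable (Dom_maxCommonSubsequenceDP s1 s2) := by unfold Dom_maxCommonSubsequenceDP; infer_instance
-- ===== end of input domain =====

-- B replaces A's bottom-up 2D DP table (nested index loops) by a top-down memoized
-- recursion on prefix lengths; same O(n*m) cost, different decomposition.


-- ===== PORT A =====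
-- Literal transliteration of A: early return on an empty string, a (size1+1)×(size2+1)
-- zero table, nested loops over range(1, size+1) filling dp[cnt1][cnt2], result dp[-1][-1].
-- All indices A uses are in range, so pyGetD/pySetD defaults are never taken.
def maxCommonSubsequenceDP (s1 : String) (s2 : String) : Int :=
  let l1 := s1.toList
  let l2 := s2.toList
  let size1 : Int := PySem.Str.len s1
  let size2 : Int := PySem.Str.len s2
  if size1 = 0 ∨ size2 = 0 then 0
  else
    let dp0 : List (List Int) :=
      (PySem.List.pyRange 0 (size1 + 1) 1).map (fun _ => List.replicate (size2 + 1).toNat (0 : Int))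
    let dp :=
      (PySem.List.pyRange 1 (size1 + 1) 1).foldl (fun dp cnt1 =>
        (PySem.List.pyRange 1 (size2 + 1) 1).foldl (fun dp cnt2 =>
          let v : Int :=
            if PySem.List.pyGetD l1 (cnt1 - 1) ' ' = PySem.List.pyGetD l2 (cnt2 - 1) ' ' then
              PySem.List.pyGetD (PySem.List.pyGetD dp (cnt1 - 1) []) (cnt2 - 1) 0 +
                ((PySem.List.pyGetD l1 (cnt1 - 1) ' ').toNat : Int) * 2
            else
              max (PySem.List.pyGetD (PySem.List.pyGetD dp cnt1 []) (cnt2 - 1) 0)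
                  (PySem.List.pyGetD (PySem.List.pyGetD dp (cnt1 - 1) []) cnt2 0)
          PySem.List.pySetD dp cnt1 (PySem.List.pySetD (PySem.List.pyGetD dp cnt1 []) cnt2 v)) dp) dp0
    PySem.List.pyGetD (PySem.List.pyGetD dp (-1) []) (-1) 0

-- ===== PORT B =====
-- B's recursion f(i, j) on prefix lengths (Source B); the memo table of Source B is a pure
-- cache, so the recursion is ported directly.  i, j here are Source B's i, j; the
-- (i+1, j+1) pattern exposes the in-range accesses s1[i-1], s2[j-1] as getD i / getD j.
def pvAltF (l1 l2 : List Char) : Nat → Nat → Int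
  | 0, _ => 0
  | _ + 1, 0 => 0
  | i + 1, j + 1 =>
    if l1.getD i ' ' = l2.getD j ' ' then
      pvAltF l1 l2 i j + ((l1.getD i ' ').toNat : Int) * 2
    else
      max (pvAltF l1 l2 (i + 1) j) (pvAltF l1 l2 i (j + 1))
  termination_by i j => i + j

def maxCommonSubsequenceDP_alt (s1 : String) (s2 : String) : Int :=
  pvAltF s1.toList s2.toList s1.toList.length s2.toList.length

-- ===== PRECONDITION & SPEC =====
def Spec_maxCommonSubsequenceDP (s1 : String) (s2 : String) (out : Int) : Prop := out = maxCommonSubsequenceDP_alt s1 s2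
instance (s1 : String) (s2 : String) (out : Int) : Decidable (Spec_maxCommonSubsequenceDP s1 s2 out) := by unfold Spec_maxCommonSubsequenceDP; infer_instance

-- ===== CLAIM (what is proved, stated in full; the proofs are below) =====
def Claim_equal_maxCommonSubsequenceDP : Prop := ∀ (s1 : String) (s2 : String), Dom_maxCommonSubsequenceDP s1 s2 → Spec_maxCommonSubsequenceDP s1 s2 (maxCommonSubsequenceDP s1 s2)

-- ===== LEMMAS AND PROOFS =====

-- setting inside a range-map list
theorem pvSet_map_range {β : Type} (g : Nat → β) (N t : Nat) (v : β) (ht : t < N) :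
    ((List.range N).map g).set t v = (List.range N).map (fun x => if x = t then v else g x) := by
  apply List.ext_getElem <;> simp
  intro i hi
  rcases eq_or_ne i t with rfl | hne
  · simp
  · simp [hne, Ne.symm hne]

-- base cases of B's recursion
theorem pvAltF_zero_right (l1 l2 : List Char) (i : Nat) : pvAltF l1 l2 i 0 = 0 := by
  cases i <;> simp [pvAltF]

theorem pvAltF_zero_left (l1 l2 : List Char) (j : Nat) : pvAltF l1 l2 0 j = 0 := by
  simp [pvAltF]

-- the fully computed row i of the table, and the row truncated after column j
def pvRow (l1 l2 : List Char) (i : Nat) : List Int :=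
  (List.range (l2.length + 1)).map (fun t => pvAltF l1 l2 i t)

def pvRowUpTo (l1 l2 : List Char) (i j : Nat) : List Int :=
  (List.range (l2.length + 1)).map (fun t => if t ≤ j then pvAltF l1 l2 i t else 0)

-- the table state after fully processing rows 1..i and, in row i+1, columns 1..j
def pvState (l1 l2 : List Char) (i j : Nat) : List (List Int) :=
  (List.range (l1.length + 1)).map (fun k =>
    if k ≤ i then pvRow l1 l2 k
    else if k = i + 1 then pvRowUpTo l1 l2 (i + 1) j
    else List.replicate (l2.length + 1) (0 : Int))

theorem pvRowUpTo_zero (l1 l2 : List Char) (i : Nat) :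
    pvRowUpTo l1 l2 i 0 = List.replicate (l2.length + 1) (0 : Int) := by
  apply List.ext_getElem <;> simp [pvRowUpTo]
  intro k hk
  rcases Nat.eq_zero_or_pos k with rfl | hpos
  · simp [pvAltF_zero_right]
  · omega

theorem pvRow_zero (l1 l2 : List Char) :
    pvRow l1 l2 0 = List.replicate (l2.length + 1) (0 : Int) := by
  apply List.ext_getElem <;> simp [pvRow, pvAltF_zero_left]

theorem pvRowUpTo_full (l1 l2 : List Char) (i : Nat) :
    pvRowUpTo l1 l2 i l2.length = pvRow l1 l2 i := by
  apply List.ext_getElem <;> simp [pvRowUpTo, pvRow]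
  intro k hk
  omega


-- the table with rows 1..i fully computed, later rows still zero
def pvDone (l1 l2 : List Char) (i : Nat) : List (List Int) :=
  (List.range (l1.length + 1)).map (fun k =>
    if k ≤ i then pvRow l1 l2 k else List.replicate (l2.length + 1) (0 : Int))

theorem pvState_zero (l1 l2 : List Char) (i : Nat) :
    pvState l1 l2 i 0 = pvDone l1 l2 i := by
  unfold pvState pvDone
  apply List.map_congr_left
  intro k _
  by_cases h1 : k ≤ i
  · simp [h1]
  · by_cases h2 : k = i + 1 <;> simp [h1, h2, pvRowUpTo_zero]

theorem pvState_full (l1 l2 : List Char) (i : Nat) :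
    pvState l1 l2 i l2.length = pvDone l1 l2 (i + 1) := by
  unfold pvState pvDone
  apply List.map_congr_left
  intro k _
  by_cases h1 : k ≤ i
  · simp [h1, Nat.le_succ_of_le h1]
  · by_cases h2 : k = i + 1
    · simp [h2, pvRowUpTo_full]
    · rw [if_neg h1, if_neg h2, if_neg (show ¬ k ≤ i + 1 from by omega)]

-- generic loop invariant for a foldl over List.range
theorem pvFoldl_range_inv {s : Type} (f : s → Nat → s) (g : Nat → s) :
    ∀ J : Nat, (∀ j, j < J → f (g j) j = g (j + 1)) →
      (List.range J).foldl f (g 0) = g J := by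
  intro J
  induction J with
  | zero => intro _; simp
  | succ J ih =>
    intro hstep
    rw [List.range_succ, List.foldl_append]
    rw [ih (fun j hj => hstep j (by omega))]
    simpa using hstep J (by omega)

-- one inner-loop step: writing cell (i+1, j+1) extends the partial row by one column
theorem pvInnerStep (l1 l2 : List Char) (i j : Nat) (hi : i < l1.length) (hj : j < l2.length) :
    (PySem.List.pySetD (pvState l1 l2 i j) (1 + (i : Int))
      (PySem.List.pySetD (PySem.List.pyGetD (pvState l1 l2 i j) (1 + (i : Int)) []) (1 + (j : Int))
        (if PySem.List.pyGetD l1 (1 + (i : Int) - 1) ' ' = PySem.List.pyGetD l2 (1 + (j : Int) - 1) ' ' then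
            PySem.List.pyGetD (PySem.List.pyGetD (pvState l1 l2 i j) (1 + (i : Int) - 1) []) (1 + (j : Int) - 1) 0 +
              ((PySem.List.pyGetD l1 (1 + (i : Int) - 1) ' ').toNat : Int) * 2
          else
            max (PySem.List.pyGetD (PySem.List.pyGetD (pvState l1 l2 i j) (1 + (i : Int)) []) (1 + (j : Int) - 1) 0)
                (PySem.List.pyGetD (PySem.List.pyGetD (pvState l1 l2 i j) (1 + (i : Int) - 1) []) (1 + (j : Int)) 0))))
    = pvState l1 l2 i (j + 1) := by
  have e1' : (1 + (i : Int) - 1) = ((i : Nat) : Int) := by omega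
  have e2' : (1 + (j : Int) - 1) = ((j : Nat) : Int) := by omega
  have e1 : (1 + (i : Int)) = ((i + 1 : Nat) : Int) := by omega
  have e2 : (1 + (j : Int)) = ((j + 1 : Nat) : Int) := by omega
  rw [e1', e2', e1, e2]
  simp only [PySem.List.pyGetD_natCast, PySem.List.pySetD_natCast]
  have hrow : (pvState l1 l2 i j).getD (i + 1) [] = pvRowUpTo l1 l2 (i + 1) j := by
    unfold pvState
    rw [PySem.List.getD_map_range _ _ _ _ (by omega)]
    simp
  have hprev : (pvState l1 l2 i j).getD i [] = pvRow l1 l2 i := by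
    unfold pvState
    rw [PySem.List.getD_map_range _ _ _ _ (by omega)]
    simp
  have hr1 : (pvRow l1 l2 i).getD j 0 = pvAltF l1 l2 i j := by
    unfold pvRow; exact PySem.List.getD_map_range _ _ _ _ (by omega)
  have hr2 : (pvRow l1 l2 i).getD (j + 1) 0 = pvAltF l1 l2 i (j + 1) := by
    unfold pvRow; exact PySem.List.getD_map_range _ _ _ _ (by omega)
  have hr3 : (pvRowUpTo l1 l2 (i + 1) j).getD j 0 = pvAltF l1 l2 (i + 1) j := by
    unfold pvRowUpTo
    rw [PySem.List.getD_map_range _ _ _ _ (by omega)]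
    simp
  rw [hrow, hprev, hr1, hr2, hr3]
  have hv : (if l1.getD i ' ' = l2.getD j ' ' then
        pvAltF l1 l2 i j + ((l1.getD i ' ').toNat : Int) * 2
      else max (pvAltF l1 l2 (i + 1) j) (pvAltF l1 l2 i (j + 1)))
      = pvAltF l1 l2 (i + 1) (j + 1) := by
    rw [pvAltF]
  rw [hv]
  unfold pvRowUpTo pvState
  rw [pvSet_map_range _ _ _ _ (by omega), pvSet_map_range _ _ _ _ (by omega)]
  apply List.map_congr_left
  intro k hk
  simp only [List.mem_range] at hk
  by_cases hk1 : k = i + 1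
  · subst hk1
    simp only [if_neg (by omega : ¬ i + 1 ≤ i)]
    apply List.map_congr_left
    intro t _
    by_cases ht1 : t = j + 1
    · simp [ht1]
    · by_cases ht2 : t ≤ j <;> simp [ht1, ht2, (by omega : (t ≤ j + 1) ↔ (t = j + 1 ∨ t ≤ j))]
  · simp [hk1]

-- the outer-loop body (with the whole inner loop) advances pvDone by one row
theorem pvOuterStep (l1 l2 : List Char) (i : Nat) (hi : i < l1.length) :
    (PySem.List.pyRange 1 ((l2.length : Int) + 1) 1).foldl (fun dp cnt2 =>
      PySem.List.pySetD dp (1 + (i : Int))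
        (PySem.List.pySetD (PySem.List.pyGetD dp (1 + (i : Int)) []) cnt2
          (if PySem.List.pyGetD l1 (1 + (i : Int) - 1) ' ' = PySem.List.pyGetD l2 (cnt2 - 1) ' ' then
              PySem.List.pyGetD (PySem.List.pyGetD dp (1 + (i : Int) - 1) []) (cnt2 - 1) 0 +
                ((PySem.List.pyGetD l1 (1 + (i : Int) - 1) ' ').toNat : Int) * 2
            else
              max (PySem.List.pyGetD (PySem.List.pyGetD dp (1 + (i : Int)) []) (cnt2 - 1) 0)
                  (PySem.List.pyGetD (PySem.List.pyGetD dp (1 + (i : Int) - 1) []) cnt2 0))))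
      (pvDone l1 l2 i)
    = pvDone l1 l2 (i + 1) := by
  rw [PySem.List.pyRange_one]
  rw [show (((l2.length : Int) + 1 - 1).toNat) = l2.length from by omega]
  rw [List.foldl_map, ← pvState_zero, ← pvState_full]
  apply pvFoldl_range_inv
    (g := fun j => pvState l1 l2 i j)
  intro j hj
  exact pvInnerStep l1 l2 i j hi hj

theorem pvDp0_eq (l1 l2 : List Char) :
    (PySem.List.pyRange 0 ((l1.length : Int) + 1) 1).map
        (fun _ => List.replicate (((l2.length : Int) + 1).toNat) (0 : Int))
    = pvDone l1 l2 0 := by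
  rw [PySem.List.pyRange_one, List.map_map]
  rw [show (((l1.length : Int) + 1 - 0).toNat) = l1.length + 1 from by omega]
  rw [show (((l2.length : Int) + 1).toNat) = l2.length + 1 from by omega]
  unfold pvDone
  apply List.map_congr_left
  intro k _
  by_cases hk : k ≤ 0
  · simp only [Function.comp]
    rw [if_pos hk, show k = 0 from by omega, pvRow_zero]
  · simp [Function.comp, hk]

theorem pvExtract (l1 l2 : List Char) :
    PySem.List.pyGetD (PySem.List.pyGetD (pvDone l1 l2 l1.length) (-1) []) (-1) 0
      = pvAltF l1 l2 l1.length l2.length := by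
  have hlen1 : (pvDone l1 l2 l1.length).length = l1.length + 1 := by
    unfold pvDone; simp
  have hne : pvDone l1 l2 l1.length ≠ [] := by
    intro h; rw [h] at hlen1; simp at hlen1
  rw [PySem.List.pyGetD_neg_one _ _ hne]
  have hlast : (pvDone l1 l2 l1.length).getLast hne = pvRow l1 l2 l1.length := by
    rw [List.getLast_eq_getElem]
    unfold pvDone
    simp
  rw [hlast]
  have hlen2 : (pvRow l1 l2 l1.length).length = l2.length + 1 := by
    unfold pvRow; simp
  have hne2 : pvRow l1 l2 l1.length ≠ [] := by
    intro h; rw [h] at hlen2; simp at hlen2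
  rw [PySem.List.pyGetD_neg_one _ _ hne2]
  rw [List.getLast_eq_getElem]
  unfold pvRow
  simp

-- ===== VERDICT (by name: the statement is the Claim_ definition above) =====
theorem maxCommonSubsequenceDP_spec : Claim_equal_maxCommonSubsequenceDP := by
  intro s1 s2 _
  unfold Spec_maxCommonSubsequenceDP maxCommonSubsequenceDP maxCommonSubsequenceDP_alt
  simp only [PySem.Str.len_eq]
  by_cases h : s1.toList.length = 0 ∨ s2.toList.length = 0
  · rw [if_pos (by exact_mod_cast h)]
    rcases h with h | h
    · rw [h, pvAltF_zero_left]
    · rw [h, pvAltF_zero_right]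
  · rw [if_neg (by exact_mod_cast h)]
    rw [pvDp0_eq s1.toList s2.toList]
    rw [PySem.List.pyRange_one 1 ((s1.toList.length : Int) + 1)]
    rw [show (((s1.toList.length : Int) + 1 - 1).toNat) = s1.toList.length from by omega]
    rw [List.foldl_map]
    rw [pvFoldl_range_inv _ (fun i => pvDone s1.toList s2.toList i) s1.toList.length
      (fun i hi => pvOuterStep s1.toList s2.toList i hi)]
    exact pvExtract s1.toList s2.toList
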